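-- pv_equiv track=rewrite | github.com/katerinatopol/hw_algoritm | task_3.py | list_clear
-- ===== SOURCE A (Python) =====
-- def list_clear(arr):
--     left = []
--     right = []
--     for i in arr:
--         for j in arr:
--             if i > j:
--                 left.append(j)
--             elif i < j:
--                 right.append(j)
--
--         if len(left) == len(right):
--             return i
--         left.clear()
--         right.clear()
-- ===== SOURCE B (Python) =====
-- def list_clear(arr):
--     s = sorted(arr)
--     n = len(s)
--     less = {}
--     for idx, v in reversed(list(enumerate(s))):
--         less[v] = idx              # ends holding the FIRST index of v in s = count of elements < v
--     greater = {}
--     for idx, v in enumerate(s):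
--         greater[v] = n - 1 - idx   # ends holding n-1-(last index of v) = count of elements > v
--     for x in arr:
--         if less[x] == greater[x]:
--             return x
--     return None
-- ===== Notes on version B (the rewrite author's own statement) =====
-- stated objective: faster
-- what changed: Instead of rebuilding the lists of smaller and larger elements with an inner scan for every candidate, B sorts the array once, builds two dicts (first index in the sorted list = count of smaller elements; n-1-last index = count of larger elements) in two linear passes, and then scans the original order with O(1) lookups.
import Mathlib
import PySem

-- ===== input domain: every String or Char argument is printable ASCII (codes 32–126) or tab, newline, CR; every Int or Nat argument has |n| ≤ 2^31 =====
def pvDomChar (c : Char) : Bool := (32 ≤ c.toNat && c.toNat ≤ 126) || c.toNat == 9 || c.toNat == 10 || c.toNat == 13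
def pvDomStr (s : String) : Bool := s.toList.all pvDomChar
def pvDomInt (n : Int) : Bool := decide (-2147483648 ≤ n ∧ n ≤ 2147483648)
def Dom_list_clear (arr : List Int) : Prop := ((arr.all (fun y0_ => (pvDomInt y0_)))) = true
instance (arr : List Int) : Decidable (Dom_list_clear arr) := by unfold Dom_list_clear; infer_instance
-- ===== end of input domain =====

-- B replaces A's quadratic rescan (for every i, rebuild the lists of smaller/larger elements)
-- by one sort plus two linear index-building passes over the sorted list; equal return value on every input.

-- ===== PORT A =====
-- outer 'for i in arr' loop of A; the inner 'for j in arr' loop is the foldl building (left, right)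
def pvLoopA (arr : List Int) : List Int → Option Int
  | [] => none
  | i :: rest =>
    let p := arr.foldl (fun (lr : List Int × List Int) j =>
        if i > j then (lr.1 ++ [j], lr.2)
        else if i < j then (lr.1, lr.2 ++ [j])
        else lr) ([], [])
    if p.1.length = p.2.length then some i else pvLoopA arr rest

def list_clear (arr : List Int) : Option Int := pvLoopA arr arr

-- ===== PORT B =====
def pvSortedB (arr : List Int) : List Int := PySem.List.sorted arr (fun x => x) false

-- 'for idx, v in reversed(list(enumerate(s))): less[v] = idx'
def pvLessB (arr : List Int) : PySem.Dict Int Int :=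
  ((PySem.List.enumerate (pvSortedB arr) 0).reverse).foldl
    (fun d p => d.insert p.2 p.1) PySem.Dict.empty

-- 'for idx, v in enumerate(s): greater[v] = n - 1 - idx'
def pvGreaterB (arr : List Int) : PySem.Dict Int Int :=
  (PySem.List.enumerate (pvSortedB arr) 0).foldl
    (fun d p => d.insert p.2 (((pvSortedB arr).length : Int) - 1 - p.1)) PySem.Dict.empty

-- 'for x in arr: if less[x] == greater[x]: return x'; the 'none' on a missing key is
-- Python's KeyError, unreachable because every x ∈ arr is a key of both dicts
def pvLoopB (less greater : PySem.Dict Int Int) : List Int → Option Int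
  | [] => none
  | x :: rest =>
    match less.get? x, greater.get? x with
    | some l, some g => if l = g then some x else pvLoopB less greater rest
    | _, _ => none

def list_clear_alt (arr : List Int) : Option Int :=
  pvLoopB (pvLessB arr) (pvGreaterB arr) arr

-- ===== PRECONDITION & SPEC =====
def Spec_list_clear (arr : List Int) (out : Option Int) : Prop := out = list_clear_alt arr
instance (arr : List Int) (out : Option Int) : Decidable (Spec_list_clear arr out) := by unfold Spec_list_clear; infer_instance

-- ===== CLAIM (what is proved, stated in full; the proofs are below) =====
def Claim_equal_list_clear : Prop := ∀ (arr : List Int), Dom_list_clear arr → Spec_list_clear arr (list_clear arr)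

-- ===== LEMMAS AND PROOFS =====

-- get? after a fold of inserts keyed by the pair's second component: the LAST insert wins
theorem pv_get?_foldl_insert (f : Int × Int → Int) (ps : List (Int × Int))
    (d : PySem.Dict Int Int) (x : Int) :
    (ps.foldl (fun d p => d.insert p.2 (f p)) d).get? x =
      (match ps.reverse.find? (fun p => p.2 == x) with
       | some p => some (f p)
       | none => d.get? x) := by
  induction ps using List.reverseRecOn with
  | nil => simp
  | append_singleton qs p ih =>
    rw [List.foldl_append]
    simp only [List.foldl_cons, List.foldl_nil, List.reverse_append, List.reverse_singleton,
      List.singleton_append]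
    by_cases h : p.2 = x
    · subst h
      rw [List.find?_cons_of_pos (by simp)]
      simp [PySem.Dict.get?_insert_self]
    · rw [List.find?_cons_of_neg (by simp [h]),
        PySem.Dict.get?_insert_of_ne _ _ (Ne.symm h), ih]

-- in a sorted list, the FIRST pair of enumerate carrying value v sits at index = #{j < v}
theorem pv_find_first (s : List Int) (hs : s.Pairwise (· ≤ ·)) (v : Int) (hv : v ∈ s) (k : Int) :
    (PySem.List.enumerate s k).find? (fun p => p.2 == v) =
      some (k + (s.countP (fun j => decide (j < v)) : Int), v) := by
  induction s generalizing k with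
  | nil => cases hv
  | cons a t ih =>
    rcases List.pairwise_cons.mp hs with ⟨ha, ht⟩
    rw [PySem.List.enumerate_cons]
    by_cases hav : a = v
    · subst hav
      rw [List.find?_cons_of_pos (by simp)]
      have h0 : t.countP (fun j => decide (j < a)) = 0 :=
        List.countP_eq_zero.mpr (fun b hb => by simpa using not_lt.mpr (ha b hb))
      simp [h0]
    · have hvt : v ∈ t := (List.mem_cons.mp hv).resolve_left (fun h => hav h.symm)
      have hlt : a < v := lt_of_le_of_ne (ha v hvt) hav
      rw [List.find?_cons_of_neg (by simp [hav]), ih ht hvt (k + 1)]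
      have hd : (decide (a < v)) = true := decide_eq_true hlt
      simp only [List.countP_cons, hd, if_true]
      congr 2
      push_cast
      ring

-- in a sorted list, the LAST pair of enumerate carrying value v sits at index = len-1-#{j > v}
theorem pv_find_last (s : List Int) (hs : s.Pairwise (· ≤ ·)) (v : Int) (hv : v ∈ s) (k : Int) :
    (PySem.List.enumerate s k).reverse.find? (fun p => p.2 == v) =
      some (k + (s.length : Int) - 1 - (s.countP (fun j => decide (v < j)) : Int), v) := by
  induction s using List.reverseRecOn generalizing k with
  | nil => cases hv
  | append_singleton t a ih =>
    have hta : ∀ b ∈ t, b ≤ a := by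
      intro b hb
      exact (List.pairwise_append.mp hs).2.2 b hb a (List.mem_singleton.mpr rfl)
    have hpt : t.Pairwise (· ≤ ·) := (List.pairwise_append.mp hs).1
    rw [PySem.List.enumerate_append]
    simp only [PySem.List.enumerate_cons, PySem.List.enumerate_nil, List.reverse_append,
      List.reverse_cons, List.reverse_nil, List.nil_append, List.singleton_append]
    by_cases hav : a = v
    · subst hav
      rw [List.find?_cons_of_pos (by simp)]
      have h0 : t.countP (fun j => decide (a < j)) = 0 :=
        List.countP_eq_zero.mpr (fun b hb => by simpa using not_lt.mpr (hta b hb))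
      simp only [List.countP_append, List.countP_cons, List.countP_nil, h0,
        lt_self_iff_false, decide_false, List.length_append, List.length_cons,
        List.length_nil, Option.some.injEq, Prod.mk.injEq]
      refine ⟨by push_cast; ring, trivial⟩
    · have hvt : v ∈ t := by
        rcases List.mem_append.mp hv with h | h
        · exact h
        · exact absurd (List.mem_singleton.mp h).symm hav
      have hlt : v < a := lt_of_le_of_ne (hta v hvt) (fun h => hav h.symm)
      rw [List.find?_cons_of_neg (by simp [hav]), ih hpt hvt k]
      have hd : (decide (v < a)) = true := decide_eq_true hlt
      simp only [List.countP_append, List.countP_cons, List.countP_nil, hd, if_true,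
        List.length_append, List.length_cons, List.length_nil, Option.some.injEq,
        Prod.mk.injEq]
      refine ⟨by push_cast; ring, trivial⟩

theorem pv_less_get (arr : List Int) (v : Int) (hv : v ∈ arr) :
    (pvLessB arr).get? v = some ((arr.countP (fun j => decide (j < v)) : Int)) := by
  have hvs : v ∈ pvSortedB arr := (PySem.List.mem_sorted arr (fun x => x) false v).mpr hv
  have hperm : (pvSortedB arr).Perm arr := PySem.List.sorted_perm arr (fun x => x) false
  have hpw : (pvSortedB arr).Pairwise (· ≤ ·) := PySem.List.sorted_pairwise arr (fun x => x)
  rw [pvLessB, pv_get?_foldl_insert (f := fun p => p.1)]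
  rw [List.reverse_reverse, pv_find_first (pvSortedB arr) hpw v hvs 0]
  simp [hperm.countP_eq]

theorem pv_greater_get (arr : List Int) (v : Int) (hv : v ∈ arr) :
    (pvGreaterB arr).get? v = some ((arr.countP (fun j => decide (v < j)) : Int)) := by
  have hvs : v ∈ pvSortedB arr := (PySem.List.mem_sorted arr (fun x => x) false v).mpr hv
  have hperm : (pvSortedB arr).Perm arr := PySem.List.sorted_perm arr (fun x => x) false
  have hpw : (pvSortedB arr).Pairwise (· ≤ ·) := PySem.List.sorted_pairwise arr (fun x => x)
  rw [pvGreaterB,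
    pv_get?_foldl_insert (f := fun p => ((pvSortedB arr).length : Int) - 1 - p.1)]
  rw [pv_find_last (pvSortedB arr) hpw v hvs 0]
  simp only [hperm.countP_eq]
  congr 1
  ring

-- A's inner loop computes exactly the two counts
theorem pv_inner_A (arr : List Int) (i : Int) :
    arr.foldl (fun (lr : List Int × List Int) j =>
        if i > j then (lr.1 ++ [j], lr.2)
        else if i < j then (lr.1, lr.2 ++ [j])
        else lr) ([], []) =
      (arr.filter (fun j => decide (j < i)), arr.filter (fun j => decide (i < j))) := by
  have hcongr : arr.foldl (fun (lr : List Int × List Int) j =>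
        if i > j then (lr.1 ++ [j], lr.2)
        else if i < j then (lr.1, lr.2 ++ [j])
        else lr) ([], []) =
      arr.foldl (fun (lr : List Int × List Int) j =>
        ((if decide (j < i) then lr.1 ++ [j] else lr.1),
         (if decide (i < j) then lr.2 ++ [j] else lr.2))) ([], []) := by
    apply PySem.List.foldl_congr_mem
    intro lr j _
    rcases lt_trichotomy i j with h | h | h
    · simp [not_lt.mpr (le_of_lt h), h]
    · simp [h]
    · simp [h, not_lt.mpr (le_of_lt h)]
  rw [hcongr,
    PySem.List.foldl_prod_mk (f := fun l j => if decide (j < i) then l ++ [j] else l)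
      (g := fun r j => if decide (i < j) then r ++ [j] else r)]
  rw [PySem.List.foldl_append_if_eq_filter, PySem.List.foldl_append_if_eq_filter]
  simp

theorem pv_loops_eq (arr : List Int) :
    ∀ l, (∀ x ∈ l, x ∈ arr) →
      pvLoopA arr l = pvLoopB (pvLessB arr) (pvGreaterB arr) l := by
  intro l
  induction l with
  | nil => intro _; rfl
  | cons x rest ih =>
    intro hsub
    have hx : x ∈ arr := hsub x (List.mem_cons_self)
    rw [pvLoopA, pvLoopB, pv_less_get arr x hx, pv_greater_get arr x hx]
    simp only [pv_inner_A]
    by_cases h : arr.countP (fun j => decide (j < x)) = arr.countP (fun j => decide (x < j))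
    · rw [if_pos (by rw [← List.countP_eq_length_filter, ← List.countP_eq_length_filter]; exact h)]
      rw [if_pos (by exact_mod_cast h)]
    · rw [if_neg (by rw [← List.countP_eq_length_filter, ← List.countP_eq_length_filter]; exact h)]
      rw [if_neg (fun hc => h (by exact_mod_cast hc))]
      exact ih (fun y hy => hsub y (List.mem_cons_of_mem _ hy))

-- ===== VERDICT (by name: the statement is the Claim_ definition above) =====
theorem list_clear_spec : Claim_equal_list_clear := by
  intro arr _
  unfold Spec_list_clear list_clear list_clear_alt
  exact pv_loops_eq arr arr (fun _ h => h)
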